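-- pv_equiv track=rewrite | github.com/Nutsacjac/ncaa-betting-model | nba-betting-model/picks_db.py | _calc_best_streak
-- ===== SOURCE A (Python) =====
-- def _calc_best_streak(picks, target_status):
--     """Find longest streak of target_status."""
--     best = 0
--     current = 0
--     for p in picks:
--         if p["status"] == target_status:
--             current += 1
--             best = max(best, current)
--         elif p["status"] != "push":
--             current = 0
--     return best
-- ===== SOURCE B (Python) =====
-- from itertools import groupby
--
-- def _calc_best_streak(picks, target_status):
--     """Find longest streak of target_status."""
--     statuses = [p["status"] for p in picks
--                 if p["status"] != "push" or p["status"] == target_status]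
--     return max((sum(1 for _ in g) for k, g in groupby(statuses)
--                 if k == target_status), default=0)
-- ===== Notes on version B (the rewrite author's own statement) =====
-- stated objective: idiomatic
-- what changed: Replaced the running best/current counter scan with a filter pass that drops pushes (kept when they are the target) followed by an itertools.groupby run-length pass taking the max run equal to target_status.
import Mathlib
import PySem

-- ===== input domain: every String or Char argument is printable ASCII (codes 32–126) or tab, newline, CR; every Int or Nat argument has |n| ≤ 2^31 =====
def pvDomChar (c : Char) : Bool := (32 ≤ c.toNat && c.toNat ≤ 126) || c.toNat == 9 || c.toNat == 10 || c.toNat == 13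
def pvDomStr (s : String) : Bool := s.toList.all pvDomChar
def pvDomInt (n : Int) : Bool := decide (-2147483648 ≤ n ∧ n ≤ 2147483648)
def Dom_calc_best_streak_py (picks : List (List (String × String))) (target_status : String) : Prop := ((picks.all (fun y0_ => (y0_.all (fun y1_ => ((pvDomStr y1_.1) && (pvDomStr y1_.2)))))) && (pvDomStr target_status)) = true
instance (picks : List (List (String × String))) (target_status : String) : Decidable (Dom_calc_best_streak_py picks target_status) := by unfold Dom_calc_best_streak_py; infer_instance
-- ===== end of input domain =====

-- B replaces A's running best/current counter with a filter-out-pushes pass followed by a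
-- groupby run-length pass taking the longest run equal to target_status (idiomatic; same cost).


-- p["status"]: first-match association-list lookup; Pre_ guarantees the key is present,
-- so the "" default is never used inside Pre_.
def pvStatus (p : List (String × String)) : String :=
  (List.lookup "status" p).getD ""

-- ===== PORT A =====
def calc_best_streak_py (picks : List (List (String × String))) (target_status : String) : Int :=
  let st := picks.foldl (fun (bc : Int × Int) p =>
    if pvStatus p = target_status then (max bc.1 (bc.2 + 1), bc.2 + 1)
    else if pvStatus p ≠ "push" then (bc.1, 0)
    else bc) (0, 0)
  st.1

-- ===== PORT B =====
-- itertools.groupby over the filtered status list, as run-length pairs (key, run length)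
def pvRuns (l : List String) : List (String × Nat) :=
  match l with
  | [] => []
  | s :: t => (s, 1 + (t.takeWhile (· == s)).length) :: pvRuns (t.dropWhile (· == s))
termination_by l.length
decreasing_by
  simp only [List.length_cons]
  exact Nat.lt_succ_of_le (List.dropWhile_sublist _ ).length_le

def calc_best_streak_py_alt (picks : List (List (String × String))) (target_status : String) : Int :=
  let statuses := (picks.map pvStatus).filter
    (fun s => s ≠ "push" || s = target_status)
  ((pvRuns statuses).filterMap
    (fun kn => if kn.1 = target_status then some ((kn.2 : Int)) else none)).foldl max 0

-- ===== PRECONDITION & SPEC =====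
-- Pre_ excludes exactly the picks missing a "status" key, on which Python A raises KeyError.
def Pre_calc_best_streak_py (picks : List (List (String × String))) (target_status : String) : Prop :=
  ∀ p ∈ picks, (List.lookup "status" p).isSome = true
instance (picks : List (List (String × String))) (target_status : String) : Decidable (Pre_calc_best_streak_py picks target_status) := by unfold Pre_calc_best_streak_py; infer_instance

def pvWitness_calc_best_streak_py : (List (List (String × String))) × String :=
  ([[("status", "win")], [("status", "push")], [("status", "win")], [("status", "loss")]], "win")

def Spec_calc_best_streak_py (picks : List (List (String × String))) (target_status : String) (out : Int) : Prop := out = calc_best_streak_py_alt picks target_status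
instance (picks : List (List (String × String))) (target_status : String) (out : Int) : Decidable (Spec_calc_best_streak_py picks target_status out) := by unfold Spec_calc_best_streak_py; infer_instance

-- ===== CLAIM (what is proved, stated in full; the proofs are below) =====
def Claim_equal_calc_best_streak_py : Prop := ∀ (picks : List (List (String × String))) (target_status : String), Dom_calc_best_streak_py picks target_status → Pre_calc_best_streak_py picks target_status → Spec_calc_best_streak_py picks target_status (calc_best_streak_py picks target_status)

-- ===== LEMMAS AND PROOFS =====

-- A's loop state on the (push-filtered) status list
def pvF (t : String) (b c : Int) : List String → Int
  | [] => b
  | s :: l => if s = t then pvF t (max b (c + 1)) (c + 1) l else pvF t b 0 l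

-- "max streak value reachable" with a current run of length c already open
def pvR (t : String) (c : Int) : List String → Int
  | [] => 0
  | s :: l => if s = t then max (c + 1) (pvR t (c + 1) l) else pvR t 0 l

theorem pvA_fold_eq (t : String) (picks : List (List (String × String))) :
    ∀ b c : Int,
    picks.foldl (fun (bc : Int × Int) p =>
      if pvStatus p = t then (max bc.1 (bc.2 + 1), bc.2 + 1)
      else if pvStatus p ≠ "push" then (bc.1, 0)
      else bc) (b, c)
    = (pvF t b c ((picks.map pvStatus).filter (fun s => s ≠ "push" || s = t)),
       ((picks.foldl (fun (bc : Int × Int) p =>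
      if pvStatus p = t then (max bc.1 (bc.2 + 1), bc.2 + 1)
      else if pvStatus p ≠ "push" then (bc.1, 0)
      else bc) (b, c))).2) := by
  induction picks with
  | nil => intro b c; rfl
  | cons p ps ih =>
    intro b c
    by_cases h : pvStatus p = t
    · simpa [h, pvF] using ih (max b (c + 1)) (c + 1)
    · by_cases hp : pvStatus p = "push"
      · have ht : ¬ ("push" = t) := by rw [← hp]; exact h
        simpa [h, hp, ht, pvF] using ih b c
      · simpa [h, hp, pvF] using ih b 0

theorem pvR_nonneg (t : String) (c : Int) (l : List String) : 0 ≤ pvR t c l := by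
  induction l generalizing c with
  | nil => simp [pvR]
  | cons s l ih =>
    by_cases h : s = t <;> simp [pvR, h]
    · exact Or.inr (ih _)
    · exact ih _

theorem pvF_eq_max_pvR (t : String) (l : List String) :
    ∀ b c : Int, 0 ≤ b → pvF t b c l = max b (pvR t c l) := by
  induction l with
  | nil =>
    intro b c hb; simp [pvF, pvR]; omega
  | cons s l ih =>
    intro b c hb
    by_cases h : s = t
    · rw [show pvF t b c (s :: l) = pvF t (max b (c + 1)) (c + 1) l by simp [pvF, h],
          show pvR t c (s :: l) = max (c + 1) (pvR t (c + 1) l) by simp [pvR, h],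
          ih _ _ (le_trans hb (le_max_left _ _))]
      omega
    · rw [show pvF t b c (s :: l) = pvF t b 0 l by simp [pvF, h],
          show pvR t c (s :: l) = pvR t 0 l by simp [pvR, h]]
      exact ih _ _ hb

theorem pvR_append_ne (t : String) (u v : List String) (hu : ∀ x ∈ u, x ≠ t) :
    pvR t 0 (u ++ v) = pvR t 0 v := by
  induction u with
  | nil => rfl
  | cons x u ih =>
    simp only [List.cons_append, pvR, if_neg (hu x (by simp))]
    exact ih (fun y hy => hu y (by simp [hy]))

theorem pvR_reset (t : String) (v : List String) (c : Int)
    (hv : ∀ hd, v.head? = some hd → hd ≠ t) : pvR t c v = pvR t 0 v := by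
  cases v with
  | nil => rfl
  | cons y v => simp [pvR, hv y rfl]

theorem pvR_append_eq (t : String) (u : List String) :
    ∀ (v : List String) (c : Int), 0 ≤ c → (∀ x ∈ u, x = t) →
    (∀ hd, v.head? = some hd → hd ≠ t) →
    max (c + 1) (pvR t (c + 1) (u ++ v)) = max (c + 1 + u.length) (pvR t 0 v) := by
  induction u with
  | nil =>
    intro v c hc _ hv
    simp only [List.nil_append]
    rw [pvR_reset t v (c+1) hv]
    simp
  | cons x u ih =>
    intro v c hc hu hv
    have hx : x = t := hu x (by simp)
    simp only [List.cons_append, pvR, if_pos hx, List.length_cons]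
    have h2 := ih v (c + 1) (by omega) (fun y hy => hu y (by simp [hy])) hv
    have hle : 0 ≤ pvR t 0 v := pvR_nonneg t 0 v
    omega

theorem pvFoldMax (l : List Int) : ∀ a b : Int, l.foldl max (max a b) = max a (l.foldl max b) := by
  induction l with
  | nil => intro a b; rfl
  | cons x l ih =>
    intro a b
    simp only [List.foldl_cons, max_assoc]
    exact ih a (max b x)

theorem pvFoldMax' (l : List Int) (a : Int) (ha : 0 ≤ a) :
    l.foldl max a = max a (l.foldl max 0) := by
  conv_lhs => rw [← max_eq_left ha]
  exact pvFoldMax l a 0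

theorem pvFoldMax_nonneg (l : List Int) : 0 ≤ l.foldl max 0 := by
  induction l with
  | nil => simp
  | cons x l ih =>
    calc (0:Int) ≤ max 0 (l.foldl max x) := le_max_left _ _
      _ = l.foldl max (max 0 x) := (pvFoldMax l 0 x).symm
      _ = (x :: l).foldl max 0 := rfl

theorem head?_dropWhile_ne {p : String → Bool} (l : List String) :
    ∀ hd, (l.dropWhile p).head? = some hd → p hd = false := by
  induction l with
  | nil => intro hd h; simp [List.dropWhile] at h
  | cons x l ih =>
    intro hd h
    by_cases hx : p x
    · rw [List.dropWhile_cons_of_pos hx] at h; exact ih hd h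
    · rw [List.dropWhile_cons_of_neg hx] at h
      simp at h
      rw [← h]; exact eq_false_of_ne_true hx

theorem pvR_eq_runs (t : String) : ∀ (l : List String),
    pvR t 0 l = ((pvRuns l).filterMap
      (fun kn => if kn.1 = t then some ((kn.2 : Int)) else none)).foldl max 0 := by
  intro l
  induction hn : l.length using Nat.strong_induction_on generalizing l with
  | _ n ih =>
    cases l with
    | nil => simp [pvR, pvRuns]
    | cons s rest =>
      have hdec : (rest.dropWhile (· == s)).length < n := by
        subst hn
        simp only [List.length_cons]
        exact Nat.lt_succ_of_le (List.dropWhile_sublist _).length_le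
      have hsplit : rest = rest.takeWhile (· == s) ++ rest.dropWhile (· == s) :=
        (List.takeWhile_append_dropWhile).symm
      have hIH := ih _ hdec (rest.dropWhile (· == s)) rfl
      have hhd : ∀ hd, ((rest.dropWhile (· == s)).head? = some hd) → hd ≠ s := by
        intro hd h hcontra
        have := head?_dropWhile_ne rest hd h
        simp [hcontra] at this
      by_cases h : s = t
      · subst h
        have htw : ∀ x ∈ rest.takeWhile (· == s), x = s := by
          intro x hx
          have := List.mem_takeWhile_imp hx
          simpa using this
        rw [pvRuns]
        simp only [pvR, List.filterMap_cons, ite_true, List.foldl_cons]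
        rw [pvFoldMax]
        rw [pvFoldMax' _ _ (Int.natCast_nonneg _)]
        rw [← hIH]
        conv_lhs => rw [hsplit]
        have := pvR_append_eq s (rest.takeWhile (· == s)) (rest.dropWhile (· == s)) 0
          (by omega) htw hhd
        simp only [zero_add] at this ⊢
        rw [this]
        have hnn := pvR_nonneg s 0 (rest.dropWhile (· == s))
        push_cast
        omega
      · have htw : ∀ x ∈ rest.takeWhile (· == s), x ≠ t := by
          intro x hx
          have := List.mem_takeWhile_imp hx
          simp at this
          rw [this]; exact h
        rw [pvRuns]
        simp only [pvR, List.filterMap_cons, if_neg h]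
        rw [← hIH]
        conv_lhs => rw [hsplit]
        exact pvR_append_ne t _ _ htw

-- ===== VERDICT (by name: the statement is the Claim_ definition above) =====
theorem calc_best_streak_py_spec : Claim_equal_calc_best_streak_py := by
  intro picks t _ _
  unfold Spec_calc_best_streak_py calc_best_streak_py calc_best_streak_py_alt
  simp only
  rw [pvA_fold_eq t picks 0 0]
  simp only
  rw [pvF_eq_max_pvR t _ 0 0 le_rfl]
  rw [pvR_eq_runs t]
  have := pvFoldMax_nonneg (((pvRuns ((picks.map pvStatus).filter (fun s => s ≠ "push" || s = t))).filterMap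
      (fun kn => if kn.1 = t then some ((kn.2 : Int)) else none)))
  omega
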